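-- pv_equiv track=rewrite | github.com/Keshav12kai/EXPERIMENT | backtest_full.py | _max_consec
-- ===== SOURCE A (Python) =====
-- def _max_consec(trades, kind):
--     mx = 0; cur = 0
--     for t in trades:
--         if t["result"] == kind:
--             cur += 1; mx = max(mx, cur)
--         else:
--             cur = 0
--     return mx
-- ===== SOURCE B (Python) =====
-- from itertools import groupby
--
-- def _max_consec(trades, kind):
--     return max((sum(1 for _ in g)
--                 for k, g in groupby(trades, key=lambda t: t["result"])
--                 if k == kind),
--                default=0)
-- ===== Notes on version B (the rewrite author's own statement) =====
-- stated objective: idiomatic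
-- what changed: Replaces the running-counter/maximum loop with itertools.groupby: split the sequence into maximal runs of equal results and take the max length of the runs whose key equals kind (default 0).
import Mathlib
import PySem

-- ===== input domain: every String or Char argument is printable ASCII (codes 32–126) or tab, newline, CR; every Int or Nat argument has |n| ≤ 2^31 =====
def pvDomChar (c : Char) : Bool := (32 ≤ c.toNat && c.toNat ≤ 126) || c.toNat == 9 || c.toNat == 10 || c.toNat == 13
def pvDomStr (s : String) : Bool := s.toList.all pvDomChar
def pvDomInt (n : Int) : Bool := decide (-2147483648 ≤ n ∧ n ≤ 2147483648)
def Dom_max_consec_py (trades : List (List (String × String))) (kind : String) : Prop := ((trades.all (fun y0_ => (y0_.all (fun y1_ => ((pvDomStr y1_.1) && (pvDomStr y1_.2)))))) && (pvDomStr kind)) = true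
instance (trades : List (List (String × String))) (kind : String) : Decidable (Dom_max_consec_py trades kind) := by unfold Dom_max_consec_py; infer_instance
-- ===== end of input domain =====

-- B replaces A's running-counter/maximum loop by a groupby-style decomposition into maximal
-- runs of equal results, taking the max length of the runs whose key equals `kind` (objective: idiomatic).

-- ===== PORT A =====
-- t["result"] for a trade dict; total stand-in (Pre_ guarantees the key is present).
def pvResult (t : List (String × String)) : String :=
  ((PySem.Dict.mk t).get? "result").getD ""

-- the body of A's for-loop over state (mx, cur)
def pvStep (kind : String) (p : Int × Int) (t : List (String × String)) : Int × Int :=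
  if pvResult t == kind then (max p.1 (p.2 + 1), p.2 + 1) else (p.1, 0)

def max_consec_py (trades : List (List (String × String))) (kind : String) : Int :=
  (trades.foldl (pvStep kind) ((0 : Int), (0 : Int))).1

-- ===== PORT B =====
-- itertools.groupby(trades, key=lambda t: t["result"]): the maximal runs, as (key, run length)
def pvRuns : List (List (String × String)) → List (String × Int)
  | [] => []
  | t :: ts =>
    (pvResult t, 1 + ((ts.takeWhile fun u => pvResult u == pvResult t).length : Int)) ::
      pvRuns (ts.dropWhile fun u => pvResult u == pvResult t)
termination_by l => l.length
decreasing_by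
  simp only [List.length_cons]
  exact Nat.lt_succ_of_le (List.length_dropWhile_le _ _)

-- max((len of g for k, g in groupby(...) if k == kind), default=0)
def max_consec_py_alt (trades : List (List (String × String))) (kind : String) : Int :=
  PySem.List.maxD
    ((pvRuns trades).filterMap fun p => if p.1 == kind then some p.2 else none)
    (fun x => x) 0

-- ===== PRECONDITION & SPEC =====
-- Pre_ excludes trades missing the "result" key, on which Python A raises KeyError.
def Pre_max_consec_py (trades : List (List (String × String))) (kind : String) : Prop :=
  ∀ t ∈ trades, ((PySem.Dict.mk t).contains "result") = true
instance (trades : List (List (String × String))) (kind : String) : Decidable (Pre_max_consec_py trades kind) := by unfold Pre_max_consec_py; infer_instance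

def pvWitness_max_consec_py : (List (List (String × String))) × String :=
  ([[("result", "W")], [("result", "L")], [("result", "W")]], "W")

def Spec_max_consec_py (trades : List (List (String × String))) (kind : String) (out : Int) : Prop := out = max_consec_py_alt trades kind
instance (trades : List (List (String × String))) (kind : String) (out : Int) : Decidable (Spec_max_consec_py trades kind out) := by unfold Spec_max_consec_py; infer_instance

-- ===== CLAIM (what is proved, stated in full; the proofs are below) =====
def Claim_equal_max_consec_py : Prop := ∀ (trades : List (List (String × String))) (kind : String), Dom_max_consec_py trades kind → Pre_max_consec_py trades kind → Spec_max_consec_py trades kind (max_consec_py trades kind)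

-- ===== LEMMAS AND PROOFS =====

-- folding max from a `max a b` start pulls `a` out front
lemma pv_foldl_max_shift (a : Int) (l : List Int) : ∀ b : Int,
    l.foldl max (max a b) = max a (l.foldl max b) := by
  induction l with
  | nil => intro b; simp
  | cons x l ih =>
    intro b
    simp only [List.foldl_cons]
    rw [max_assoc]
    exact ih _

-- PySem max? over a nonempty Int list is foldl max from its head
lemma pv_max?_id_eq (l : List Int) : ∀ m : Int,
    PySem.List.max? (m :: l) (fun a => a) = some (l.foldl max m) := by
  induction l with
  | nil => intro m; rfl
  | cons x l ih =>
    intro m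
    have hstep : PySem.List.max? (m :: x :: l) (fun a => a)
        = PySem.List.max? (max m x :: l) (fun a => a) := by
      simp only [PySem.List.max?, List.foldl_cons]
      congr 1
      by_cases h : m < x
      · simp [h, max_eq_right h.le]
      · simp [h, max_eq_left (not_lt.mp h)]
    rw [hstep, ih, List.foldl_cons]

-- maxD with default 0 over a cons of a nonnegative head
lemma pv_maxD_id_cons (x : Int) (l : List Int) (hx : 0 ≤ x) :
    PySem.List.maxD (x :: l) (fun a => a) 0
      = max x (PySem.List.maxD l (fun a => a) 0) := by
  cases l with
  | nil =>
    simp only [PySem.List.maxD, pv_max?_id_eq, List.foldl_nil, Option.getD_some]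
    have : PySem.List.max? ([] : List Int) (fun a => a) = none := rfl
    rw [this]
    simp [max_eq_left hx]
  | cons y l =>
    simp only [PySem.List.maxD, pv_max?_id_eq, Option.getD_some, List.foldl_cons]
    exact pv_foldl_max_shift x l y

-- distributing a max in the running maximum out of A's loop
lemma pv_step_foldl_max (kind : String) (l : List (List (String × String))) : ∀ (a b cur : Int),
    l.foldl (pvStep kind) (max a b, cur)
      = (max a (l.foldl (pvStep kind) (b, cur)).1, (l.foldl (pvStep kind) (b, cur)).2) := by
  induction l with
  | nil => intro a b cur; simp
  | cons t l ih =>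
    intro a b cur
    simp only [List.foldl_cons, pvStep]
    by_cases h : (pvResult t == kind) = true
    · simp only [h, if_true]
      rw [max_assoc]
      exact ih _ _ _
    · simp only [h, Bool.false_eq_true, if_false]
      exact ih _ _ _

lemma pv_step_mx_out (kind : String) (l : List (List (String × String))) (M : Int) (hM : 0 ≤ M) :
    (l.foldl (pvStep kind) (M, 0)).1
      = max M ((l.foldl (pvStep kind) ((0 : Int), (0 : Int))).1) := by
  have h := pv_step_foldl_max kind l M 0 0
  rw [max_eq_left hM] at h
  rw [h]

-- a block of non-matching trades leaves the state (mx, 0) unchanged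
lemma pv_step_skip (kind : String) (r : List (List (String × String))) :
    ∀ (rest : List (List (String × String))) (mx : Int),
    (∀ u ∈ r, (pvResult u == kind) = false) →
    (r ++ rest).foldl (pvStep kind) (mx, 0) = rest.foldl (pvStep kind) (mx, 0) := by
  induction r with
  | nil => intro rest mx _; simp
  | cons u r ih =>
    intro rest mx h
    have hu := h u (List.mem_cons_self ..)
    simp only [List.cons_append, List.foldl_cons, pvStep, hu, Bool.false_eq_true, if_false]
    exact ih rest mx fun v hv => h v (List.mem_cons_of_mem _ hv)

-- a block of matching trades advances the counter by its length
lemma pv_step_run (kind : String) (r : List (List (String × String))) :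
    ∀ (rest : List (List (String × String))) (mx cur : Int),
    (∀ u ∈ r, (pvResult u == kind) = true) → cur ≤ mx →
    (r ++ rest).foldl (pvStep kind) (mx, cur)
      = rest.foldl (pvStep kind) (max mx (cur + (r.length : Int)), cur + (r.length : Int)) := by
  induction r with
  | nil =>
    intro rest mx cur _ hc
    simp [max_eq_left hc]
  | cons u r ih =>
    intro rest mx cur h hc
    have hu := h u (List.mem_cons_self ..)
    simp only [List.cons_append, List.foldl_cons, pvStep, hu, if_true]
    rw [ih rest (max mx (cur + 1)) (cur + 1) (fun v hv => h v (List.mem_cons_of_mem _ hv))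
        (le_max_right _ _)]
    have h1 : (cur + 1) + (r.length : Int) = cur + ((u :: r).length : Int) := by
      simp only [List.length_cons]
      push_cast
      ring
    have h2 : max (max mx (cur + 1)) ((cur + 1) + (r.length : Int))
        = max mx (cur + ((u :: r).length : Int)) := by
      rw [max_assoc, max_eq_right (by omega : (cur + 1 : Int) ≤ (cur + 1) + (r.length : Int)), h1]
    rw [h2, h1]

-- if the head (if any) does not match, the incoming counter is irrelevant
lemma pv_step_reset (kind : String) (l : List (List (String × String))) (mx cur : Int)
    (h : ∀ u, l.head? = some u → (pvResult u == kind) = false) :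
    (l.foldl (pvStep kind) (mx, cur)).1 = (l.foldl (pvStep kind) (mx, 0)).1 := by
  cases l with
  | nil => rfl
  | cons u l =>
    have hu := h u rfl
    simp [List.foldl_cons, pvStep, hu]

-- the head of dropWhile fails the predicate
lemma pv_dropWhile_head_false {α : Type} (p : α → Bool) (l : List α) (u : α)
    (h : (l.dropWhile p).head? = some u) : p u = false := by
  induction l with
  | nil => simp at h
  | cons a l ih =>
    by_cases ha : p a = true
    · rw [List.dropWhile_cons_of_pos ha] at h
      exact ih h
    · rw [List.dropWhile_cons_of_neg ha] at h
      simp only [List.head?_cons, Option.some.injEq] at h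
      subst h
      exact Bool.not_eq_true _ |>.mp ha

-- main loop invariant: A's fold from (0,0) computes B's run-based maximum
lemma pv_main_loop (kind : String) : ∀ (n : Nat) (l : List (List (String × String))), l.length ≤ n →
    (l.foldl (pvStep kind) ((0 : Int), (0 : Int))).1 = max_consec_py_alt l kind := by
  intro n
  induction n with
  | zero =>
    intro l hl
    have hnil : l = [] := List.eq_nil_of_length_eq_zero (Nat.le_zero.mp hl)
    subst hnil
    simp [max_consec_py_alt, pvRuns, PySem.List.maxD, PySem.List.max?]
  | succ n ih =>
    intro l hl
    cases l with
    | nil => simp [max_consec_py_alt, pvRuns, PySem.List.maxD, PySem.List.max?]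
    | cons t ts =>
      have hsplit := List.takeWhile_append_dropWhile
        (p := fun u => pvResult u == pvResult t) (l := ts)
      have hrestlen : (ts.dropWhile fun u => pvResult u == pvResult t).length ≤ n := by
        have h1 := List.length_dropWhile_le (fun u => pvResult u == pvResult t) ts
        have h2 : (t :: ts).length ≤ n + 1 := hl
        simp only [List.length_cons] at h2
        omega
      by_cases hk : (pvResult t == kind) = true
      · -- matching head: the first run counts, extended by nothing (cur starts at 0)
        have hkeq : pvResult t = kind := by simpa using hk
        have hrmem : ∀ u ∈ (ts.takeWhile fun u => pvResult u == pvResult t),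
            (pvResult u == kind) = true := by
          intro u hu
          have h1 := List.mem_takeWhile_imp hu
          simp only [beq_iff_eq] at h1 ⊢
          rw [h1, hkeq]
        have hhead : ∀ u, (ts.dropWhile fun u => pvResult u == pvResult t).head? = some u →
            (pvResult u == kind) = false := by
          intro u hu
          have h1 := pv_dropWhile_head_false _ ts u hu
          rwa [hkeq] at h1
        have hB : max_consec_py_alt (t :: ts) kind
            = max (1 + ((ts.takeWhile fun u => pvResult u == pvResult t).length : Int))
                (max_consec_py_alt (ts.dropWhile fun u => pvResult u == pvResult t) kind) := by
          unfold max_consec_py_alt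
          rw [pvRuns]
          simp only [List.filterMap_cons, hk, if_true]
          exact pv_maxD_id_cons _ _ (by omega)
        rw [hB]
        have hA1 : (t :: ts).foldl (pvStep kind) ((0 : Int), (0 : Int))
            = ((ts.takeWhile fun u => pvResult u == pvResult t)
                ++ (ts.dropWhile fun u => pvResult u == pvResult t)).foldl
                  (pvStep kind) (max 0 (0 + 1), 0 + 1) := by
          rw [hsplit]
          simp [List.foldl_cons, pvStep, hk]
        rw [hA1, pv_step_run kind _ _ _ _ hrmem (le_max_right _ _), pv_step_reset kind _ _ _ hhead]
        have hM : max (max (0 : Int) (0 + 1)) ((0 + 1) + ((ts.takeWhile fun u => pvResult u == pvResult t).length : Int))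
            = 1 + ((ts.takeWhile fun u => pvResult u == pvResult t).length : Int) := by
          rw [max_eq_right (by norm_num : (0 : Int) ≤ 0 + 1),
              max_eq_right (by omega : ((0 : Int) + 1) ≤ (0 + 1) + ((ts.takeWhile fun u => pvResult u == pvResult t).length : Int))]
          omega
        rw [hM, pv_step_mx_out kind _ _ (by omega), ih _ hrestlen]
      · -- non-matching head: the whole first run is skipped on both sides
        have hne : pvResult t ≠ kind := by simpa using hk
        have hk' : (pvResult t == kind) = false := by
          simp [hne]
        have hrmem : ∀ u ∈ (ts.takeWhile fun u => pvResult u == pvResult t),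
            (pvResult u == kind) = false := by
          intro u hu
          have h1 := List.mem_takeWhile_imp hu
          simp only [beq_iff_eq] at h1
          simp [h1, hne]
        have hB : max_consec_py_alt (t :: ts) kind
            = max_consec_py_alt (ts.dropWhile fun u => pvResult u == pvResult t) kind := by
          unfold max_consec_py_alt
          rw [pvRuns]
          simp [hne]
        rw [hB]
        have hA1 : (t :: ts).foldl (pvStep kind) ((0 : Int), (0 : Int))
            = ((ts.takeWhile fun u => pvResult u == pvResult t)
                ++ (ts.dropWhile fun u => pvResult u == pvResult t)).foldl
                  (pvStep kind) ((0 : Int), (0 : Int)) := by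
          rw [hsplit]
          simp [List.foldl_cons, pvStep, hk']
        rw [hA1, pv_step_skip kind _ _ _ hrmem, ih _ hrestlen]

-- ===== VERDICT (by name: the statement is the Claim_ definition above) =====
theorem max_consec_py_spec : Claim_equal_max_consec_py := by
  intro trades kind _ _
  simp only [Spec_max_consec_py, max_consec_py]
  exact pv_main_loop kind trades.length trades le_rfl
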